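-- pv_equiv track=rewrite | github.com/Barbariansyah/pyjudge | test/segiempat/segiempat_1.py | segiempat_1
-- ===== SOURCE A (Python) =====
-- def segiempat_1(n):
--     ret = ''
--     c1 = '*'
--     c2 = '#'
--     if (n==1):
--         ret = c1
--     elif (n>2):
--         for i in range(n):
--             ret += c1
--         ret += '\n'
--         for j in range(n-2):
--             ret += c1
--             for k in range(n-2):
--                 ret += c2
--             ret += c1
--             ret += '\n'
--         for i in range(n):
--             ret += c1
--     return ret
-- ===== SOURCE B (Python) =====
-- def segiempat_1(n):
--     if n == 1:
--         return '*'
--     elif n > 2: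
--         rows = [''.join('*' if i == 0 or i == n - 1 or j == 0 or j == n - 1 else '#'
--                         for j in range(n))
--                 for i in range(n)]
--         return '\n'.join(rows)
--     else:
--         return ''
-- ===== Notes on version B (the rewrite author's own statement) =====
-- stated objective: alternative
-- what changed: A draws the figure in three sequential phases (top edge, middle rows with an inner '#' loop, bottom edge) by string accumulation; B builds every cell uniformly with one border predicate over an i,j grid and joins the rows.
import Mathlib
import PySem

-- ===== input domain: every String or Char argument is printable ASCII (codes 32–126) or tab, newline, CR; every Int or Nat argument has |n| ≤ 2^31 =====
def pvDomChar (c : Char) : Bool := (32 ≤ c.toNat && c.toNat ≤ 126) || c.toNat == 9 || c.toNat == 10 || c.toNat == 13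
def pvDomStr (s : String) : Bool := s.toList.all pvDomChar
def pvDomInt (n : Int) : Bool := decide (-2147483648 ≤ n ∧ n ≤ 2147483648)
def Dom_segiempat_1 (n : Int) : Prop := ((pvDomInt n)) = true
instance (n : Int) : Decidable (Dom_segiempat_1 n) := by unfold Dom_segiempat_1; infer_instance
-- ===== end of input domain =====

-- B replaces A's three drawing phases (top edge, middle rows, bottom edge) with one uniform
-- border-predicate grid joined by newlines; objective: alternative decomposition, same cost.

-- ===== PORT A =====
-- Python strings are ported as List Char (the PySem.Chars side) and wrapped with String.ofList at the end.
def segiempat_1 (n : Int) : String :=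
  let ret : List Char := []
  let c1 : List Char := ['*']
  let c2 : List Char := ['#']
  let ret :=
    if n == 1 then c1
    else if n > 2 then
      let ret := (PySem.List.pyRange 0 n 1).foldl (fun r _ => r ++ c1) ret
      let ret := ret ++ ['\n']
      let ret := (PySem.List.pyRange 0 (n - 2) 1).foldl (fun r _ =>
        let r := r ++ c1
        let r := (PySem.List.pyRange 0 (n - 2) 1).foldl (fun r' _ => r' ++ c2) r
        let r := r ++ c1
        r ++ ['\n']) ret
      (PySem.List.pyRange 0 n 1).foldl (fun r _ => r ++ c1) ret
    else ret
  String.ofList ret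

-- ===== PORT B =====
def segiempat_1_alt (n : Int) : String :=
  if n == 1 then "*"
  else if n > 2 then
    let rows : List (List Char) := (PySem.List.pyRange 0 n 1).map (fun i =>
      (PySem.List.pyRange 0 n 1).map (fun j =>
        if i == 0 || i == n - 1 || j == 0 || j == n - 1 then '*' else '#'))
    String.ofList (PySem.Chars.join ['\n'] rows)
  else ""

-- ===== PRECONDITION & SPEC =====
def Spec_segiempat_1 (n : Int) (out : String) : Prop := out = segiempat_1_alt n
instance (n : Int) (out : String) : Decidable (Spec_segiempat_1 n out) := by unfold Spec_segiempat_1; infer_instance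

-- ===== CLAIM (what is proved, stated in full; the proofs are below) =====
def Claim_equal_segiempat_1 : Prop := ∀ (n : Int), Dom_segiempat_1 n → Spec_segiempat_1 n (segiempat_1 n)

-- ===== LEMMAS AND PROOFS =====

-- joining with a one-character separator, head row pulled out
theorem pv_join_cons (c : Char) (x : List Char) (l : List (List Char)) :
    PySem.Chars.join [c] (x :: l) = x ++ l.flatMap (fun r => c :: r) := by
  induction l generalizing x with
  | nil => simp [PySem.Chars.join_singleton]
  | cons y ys ih =>
    rw [PySem.Chars.join_cons_cons, ih]
    simp

-- rotating the newline from after each middle row (A) to before it (B)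
theorem pv_rotate (c : Char) (R t : List Char) :
    ∀ k : Nat, c :: ((List.replicate k (R ++ [c])).flatten ++ t)
      = (List.replicate k (c :: R)).flatten ++ c :: t := by
  intro k
  induction k with
  | zero => simp
  | succ m ih => simp only [List.replicate, List.flatten_cons, List.append_assoc, List.cons_append,
                   List.nil_append]
                 rw [ih]

theorem segiempat_1_main (n : Int) (hn : 2 < n) : segiempat_1 n = segiempat_1_alt n := by
  have h1 : ¬ (n = 1) := by omega
  have h0 : (0:Int) < n := by omega
  have hR2 : PySem.List.pyRange 1 n 1 = PySem.List.pyRange 1 (n-1) 1 ++ [n-1] := by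
    have h := PySem.List.pyRange_one_succ_right (a := 1) (b := n-1) (by omega)
    simpa using h
  have hRange : PySem.List.pyRange 0 n 1 = 0 :: (PySem.List.pyRange 1 (n-1) 1 ++ [n-1]) := by
    rw [PySem.List.pyRange_one_cons h0]; norm_num [hR2]
  simp only [segiempat_1, segiempat_1_alt]
  rw [if_neg (by simp [h1]), if_pos hn, if_neg (by simp [h1]), if_pos hn]
  simp [PySem.List.length_pyRange_one, List.flatten_replicate_singleton]
  have hinner : ∀ (i : Int), ¬ i = 0 → ¬ i = n-1 →
      (List.map (fun j => if ((i = 0 ∨ i = n - 1) ∨ j = 0) ∨ j = n - 1 then '*' else '#') (PySem.List.pyRange 0 n 1))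
      = '*' :: (List.replicate (n-2).toNat '#' ++ ['*']) := by
    intro i hi0 hi1
    rw [hRange, List.map_cons, List.map_append, List.map_singleton]
    rw [List.map_congr_left (g := fun _ => '#') ?side]
    case side =>
      intro j hj
      have hj' := PySem.List.mem_pyRange_one.1 hj
      simp [hi0, hi1, show ¬ j = 0 by omega, show ¬ j = n-1 by omega]
    simp [hi0, hi1, show ¬ (n-1 : Int) = 0 by omega, List.map_const', PySem.List.length_pyRange_one,
          show (n-1-1 : Int).toNat = (n-2).toNat by omega]
  have hFrow : ∀ i ∈ PySem.List.pyRange 0 n 1,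
      (List.map (fun j => if ((i = 0 ∨ i = n - 1) ∨ j = 0) ∨ j = n - 1 then '*' else '#') (PySem.List.pyRange 0 n 1))
      = (if i = 0 ∨ i = n - 1 then List.replicate n.toNat '*'
         else '*' :: (List.replicate (n-2).toNat '#' ++ ['*'])) := by
    intro i _
    by_cases hc : i = 0 ∨ i = n - 1
    · rw [if_pos hc]
      have : ∀ j, (if ((i = 0 ∨ i = n - 1) ∨ j = 0) ∨ j = n - 1 then '*' else '#') = '*' := by
        intro j; rw [if_pos (Or.inl (Or.inl hc))]
      simp only [this, List.map_const', PySem.List.length_pyRange_one]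
      norm_num
    · rw [if_neg hc]
      exact hinner i (fun h => hc (Or.inl h)) (fun h => hc (Or.inr h))
  rw [List.map_congr_left hFrow, hRange, List.map_cons, List.map_append, List.map_singleton]
  rw [if_pos (Or.inl rfl), if_pos (Or.inr rfl)]
  rw [List.map_congr_left (g := fun _ => ('*' :: (List.replicate (n-2).toNat '#' ++ ['*']))) ?mids]
  case mids =>
    intro i hi
    have hi' := PySem.List.mem_pyRange_one.1 hi
    rw [if_neg (by omega)]
  rw [List.map_const', PySem.List.length_pyRange_one,
      show (n-1-1 : Int).toNat = (n-2).toNat by omega]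
  rw [pv_join_cons, List.flatMap_append]
  rw [List.flatMap_replicate]
  rw [show ('*' :: (List.replicate (n-2).toNat '#' ++ ['*', '\n']))
        = ('*' :: (List.replicate (n-2).toNat '#' ++ ['*'])) ++ ['\n'] by simp]
  rw [pv_rotate]
  simp

-- ===== VERDICT (by name: the statement is the Claim_ definition above) =====
theorem segiempat_1_spec : Claim_equal_segiempat_1 := by
  intro n _
  unfold Spec_segiempat_1
  by_cases h1 : n = 1
  · subst h1; decide
  · by_cases h2 : 2 < n
    · exact segiempat_1_main n h2
    · simp [segiempat_1, segiempat_1_alt, h1, h2]
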